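-- pv_equiv track=rewrite | github.com/piersto/cs50p | test/test_02/plates.py | is_valid_vanity_plate
-- ===== SOURCE A (Python) =====
-- def is_valid_vanity_plate(plate):
--     # Check length constraints
--     if not (2 <= len(plate) <= 6):
--         return False
--
--     # Ensure first two characters are letters
--     if not plate[:2].isalpha():
--         return False
--
--     # Check that numbers, if present, are only at the end
--     index = 0
--     while index < len(plate) and plate[index].isalpha():
--         index += 1
--
--     if index < len(plate):  # A number was found
--         if plate[index] == '0':  # First number must not be '0'
--             return False
--         while index < len(plate):
--             if not plate[index].isdigit():
--                 return False  # A letter appears after numbers, which is invalid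
--             index += 1
--
--     return True
-- ===== SOURCE B (Python) =====
-- def is_valid_vanity_plate(plate):
--     # Try every split point: an all-letter prefix of length >= 2 followed by
--     # either nothing or an all-digit suffix that does not start with '0'.
--     if not (2 <= len(plate) <= 6):
--         return False
--     n = len(plate)
--     return any(
--         plate[:i].isalpha() and (i == n or (plate[i:].isdigit() and plate[i] != '0'))
--         for i in range(2, n + 1)
--     )
-- ===== Notes on version B (the rewrite author's own statement) =====
-- stated objective: simpler
-- what changed: Replaced A's boundary scan (index while-loop plus per-character digit loop) by a single any() over all split points, validating each candidate letter-prefix/digit-suffix pair with whole-substring isalpha()/isdigit() tests.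
import Mathlib
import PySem

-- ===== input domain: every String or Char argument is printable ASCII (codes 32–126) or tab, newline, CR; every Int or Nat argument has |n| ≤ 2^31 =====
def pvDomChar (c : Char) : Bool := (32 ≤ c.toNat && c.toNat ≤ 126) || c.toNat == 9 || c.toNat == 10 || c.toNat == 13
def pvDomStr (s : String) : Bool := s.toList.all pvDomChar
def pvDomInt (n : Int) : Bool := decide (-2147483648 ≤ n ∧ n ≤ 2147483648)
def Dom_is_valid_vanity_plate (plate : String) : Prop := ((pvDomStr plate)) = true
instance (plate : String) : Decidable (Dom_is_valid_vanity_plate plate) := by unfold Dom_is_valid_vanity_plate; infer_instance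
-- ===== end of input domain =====

-- B replaces A's boundary scan (index loop + per-char digit loop) by one any() over all
-- split points with whole-substring isalpha/isdigit tests; objective: simpler.


-- ===== PORT A =====
-- while index < len(plate) and plate[index].isalpha(): index += 1  (scan as recursion on the suffix)
def aScanAlpha : List Char → List Char
  | [] => []
  | c :: cs => if PySem.Chars.isalpha c then aScanAlpha cs else c :: cs

-- while index < len(plate): if not plate[index].isdigit(): return False
def aAllDigits : List Char → Bool
  | [] => true
  | c :: cs => if !(PySem.Chars.isdigit c) then false else aAllDigits cs

def is_valid_vanity_plate (plate : String) : Bool :=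
  let cs := plate.toList
  let n : Int := cs.length
  if ¬ (2 ≤ n ∧ n ≤ 6) then false
  else if PySem.Chars.strIsalpha (PySem.List.slice cs none (some 2)) = false then false
  else
    match aScanAlpha cs with
    | [] => true
    | c :: rest => if c == '0' then false else aAllDigits (c :: rest)

-- ===== PORT B =====
def is_valid_vanity_plate_alt (plate : String) : Bool :=
  let cs := plate.toList
  let n : Int := cs.length
  if ¬ (2 ≤ n ∧ n ≤ 6) then false
  else
    (PySem.List.pyRange 2 (n + 1) 1).any fun i =>
      PySem.Chars.strIsalpha (PySem.List.slice cs none (some i)) &&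
      ((i == n) || (PySem.Chars.strIsdigit (PySem.List.slice cs (some i) none) &&
                    !(PySem.List.pyGet? cs i == some '0')))

-- ===== PRECONDITION & SPEC =====
def Spec_is_valid_vanity_plate (plate : String) (out : Bool) : Prop := out = is_valid_vanity_plate_alt plate
instance (plate : String) (out : Bool) : Decidable (Spec_is_valid_vanity_plate plate out) := by unfold Spec_is_valid_vanity_plate; infer_instance

-- ===== CLAIM (what is proved, stated in full; the proofs are below) =====
def Claim_equal_is_valid_vanity_plate : Prop := ∀ (plate : String), Dom_is_valid_vanity_plate plate → Spec_is_valid_vanity_plate plate (is_valid_vanity_plate plate)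

-- ===== LEMMAS AND PROOFS =====

lemma scan_eq (cs : List Char) : aScanAlpha cs = cs.dropWhile PySem.Chars.isalpha := by
  induction cs with
  | nil => rfl
  | cons c cs ih => by_cases h : PySem.Chars.isalpha c <;> simp [aScanAlpha, h, ih]

lemma digits_eq (cs : List Char) : aAllDigits cs = cs.all PySem.Chars.isdigit := by
  induction cs with
  | nil => rfl
  | cons c cs ih => by_cases h : PySem.Chars.isdigit c <;> simp [aAllDigits, h, ih]

lemma digit_not_alpha (c : Char) (h : PySem.Chars.isdigit c = true) :
    PySem.Chars.isalpha c = false := by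
  have h0 : '0'.val.toNat = 48 := rfl
  have h9 : '9'.val.toNat = 57 := rfl
  have hA : 'A'.val.toNat = 65 := rfl
  have hZ : 'Z'.val.toNat = 90 := rfl
  have ha : 'a'.val.toNat = 97 := rfl
  have hz : 'z'.val.toNat = 122 := rfl
  simp only [PySem.Chars.isdigit, PySem.Chars.isalpha, PySem.Chars.isupper, PySem.Chars.islower,
        Char.le_def, Bool.and_eq_true, decide_eq_true_eq, Bool.or_eq_false_iff,
        Bool.and_eq_false_iff, decide_eq_false_iff_not,
        UInt32.le_iff_toNat_le] at *
  omega

lemma le_len_takeWhile (p : Char → Bool) :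
    ∀ (cs : List Char) (i : Nat), i ≤ cs.length → (∀ x ∈ cs.take i, p x = true) →
      i ≤ (cs.takeWhile p).length := by
  intro cs
  induction cs with
  | nil => intro i hi _; simpa using hi
  | cons c cs ih =>
    intro i hi h
    cases i with
    | zero => exact Nat.zero_le _
    | succ j =>
      have hc : p c = true := h c (by simp [List.take_succ_cons])
      rw [List.takeWhile_cons_of_pos hc]
      simp only [List.length_cons]
      have := ih j (by simpa using hi) (fun x hx => h x (by simp [List.take_succ_cons, hx]))
      omega

lemma len_takeWhile_le_of_not (p : Char → Bool) :
    ∀ (cs : List Char) (j : Nat) (hj : j < cs.length), p cs[j] = false →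
      (cs.takeWhile p).length ≤ j := by
  intro cs
  induction cs with
  | nil => intro j hj _; simp at hj
  | cons c cs ih =>
    intro j hj h
    cases j with
    | zero =>
      simp only [List.getElem_cons_zero] at h
      rw [List.takeWhile_cons_of_neg (by simp [h])]
      simp
    | succ k =>
      by_cases hc : p c = true
      · rw [List.takeWhile_cons_of_pos hc]
        simp only [List.length_cons]
        have := ih k (by simpa using hj) (by simpa using h)
        omega
      · rw [List.takeWhile_cons_of_neg (by simp [hc])]; simp

lemma drop_len_takeWhile (p : Char → Bool) (cs : List Char) :
    cs.drop ((cs.takeWhile p).length) = cs.dropWhile p := by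
  calc cs.drop ((cs.takeWhile p).length)
      = (cs.takeWhile p ++ cs.dropWhile p).drop ((cs.takeWhile p).length) := by
        rw [List.takeWhile_append_dropWhile]
    _ = cs.dropWhile p := List.drop_left

lemma take_len_takeWhile (p : Char → Bool) (cs : List Char) :
    cs.take ((cs.takeWhile p).length) = cs.takeWhile p :=
  (List.prefix_iff_eq_take.1 (List.takeWhile_prefix p)).symm

lemma main_eq (cs : List Char) (hn2 : 2 ≤ cs.length) :
    (if PySem.Chars.strIsalpha (PySem.List.slice cs none (some 2)) = false then false
     else
       match aScanAlpha cs with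
       | [] => true
       | c :: rest => if c == '0' then false else aAllDigits (c :: rest))
    = (PySem.List.pyRange 2 ((cs.length : Int) + 1) 1).any (fun i =>
        PySem.Chars.strIsalpha (PySem.List.slice cs none (some i)) &&
        ((i == (cs.length : Int)) || (PySem.Chars.strIsdigit (PySem.List.slice cs (some i) none) &&
                      !(PySem.List.pyGet? cs i == some '0')))) := by
  have hne : cs ≠ [] := by intro e; rw [e] at hn2; simp at hn2
  have h2toNat : ((2 : Int)).toNat = 2 := rfl
  have hslice2 : PySem.List.slice cs none (some 2) = cs.take 2 := by
    rw [PySem.List.slice_to cs (by norm_num), h2toNat]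
  rw [hslice2, scan_eq, Bool.eq_iff_iff]
  constructor
  · intro h
    have h2 : PySem.Chars.strIsalpha (cs.take 2) = true := by
      by_contra hc
      rw [if_pos (by simpa using hc)] at h
      simp at h
    rw [if_neg (by simp [h2])] at h
    have halpha2 : ∀ x ∈ cs.take 2, PySem.Chars.isalpha x = true := by
      simp only [PySem.Chars.strIsalpha, Bool.and_eq_true, List.all_eq_true] at h2
      exact h2.2
    have hk2 : 2 ≤ (cs.takeWhile PySem.Chars.isalpha).length :=
      le_len_takeWhile _ cs 2 hn2 halpha2
    have hkle : (cs.takeWhile PySem.Chars.isalpha).length ≤ cs.length :=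
      (List.takeWhile_prefix _).length_le
    rw [List.any_eq_true]
    rcases hdw : cs.dropWhile PySem.Chars.isalpha with _ | ⟨c, rest⟩
    · have hall : ∀ x ∈ cs, PySem.Chars.isalpha x = true := by
        rw [List.dropWhile_eq_nil_iff] at hdw
        exact hdw
      refine ⟨(cs.length : Int), ?_, ?_⟩
      · rw [PySem.List.mem_pyRange_one]
        constructor
        · exact_mod_cast hn2
        · omega
      · have hsl : PySem.List.slice cs none (some (cs.length : Int)) = cs := by
          rw [PySem.List.slice_to cs (by positivity)]; simp
        rw [hsl]
        simp only [PySem.Chars.strIsalpha, Bool.and_eq_true, Bool.or_eq_true,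
          List.all_eq_true, List.isEmpty_eq_false_iff, Bool.not_eq_eq_eq_not, Bool.not_true,
          beq_self_eq_true]
        exact ⟨⟨hne, hall⟩, Or.inl trivial⟩
    · rw [hdw] at h
      have h' : (if (c == '0') = true then false else aAllDigits (c :: rest)) = true := h
      have hdropk : cs.drop ((cs.takeWhile PySem.Chars.isalpha).length) = c :: rest := by
        rw [drop_len_takeWhile, hdw]
      have hklt : (cs.takeWhile PySem.Chars.isalpha).length < cs.length := by
        have hl := congrArg List.length hdropk
        simp only [List.length_drop, List.length_cons] at hl
        omega
      have hc0 : (c == '0') = false := by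
        by_contra hcc
        rw [if_pos (by simpa using hcc)] at h'
        simp at h'
      rw [if_neg (by simp [hc0]), digits_eq] at h'
      refine ⟨((cs.takeWhile PySem.Chars.isalpha).length : Int), ?_, ?_⟩
      · rw [PySem.List.mem_pyRange_one]
        constructor
        · exact_mod_cast hk2
        · have : ((cs.takeWhile PySem.Chars.isalpha).length : Int) < (cs.length : Int) := by
            exact_mod_cast hklt
          omega
      · rw [PySem.List.slice_to cs (by positivity), Int.toNat_natCast, take_len_takeWhile,
           PySem.List.slice_from cs (by positivity), Int.toNat_natCast, hdropk,
           PySem.List.pyGet?_natCast]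
        have hget : cs[(cs.takeWhile PySem.Chars.isalpha).length]? = some c := by
          rw [List.drop_eq_getElem_cons hklt] at hdropk
          injection hdropk with hh _
          rw [List.getElem?_eq_getElem hklt, hh]
        rw [hget]
        have htwne : cs.takeWhile PySem.Chars.isalpha ≠ [] := by
          intro e; rw [e] at hk2; simp at hk2
        simp only [PySem.Chars.strIsalpha, PySem.Chars.strIsdigit, Bool.and_eq_true,
          Bool.or_eq_true, List.all_eq_true, List.isEmpty_eq_false_iff, Bool.not_eq_eq_eq_not,
          Bool.not_true, beq_eq_false_iff_ne, ne_eq]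
        refine ⟨⟨htwne, fun x hx => List.mem_takeWhile_imp hx⟩, Or.inr ⟨⟨by simp, by simpa using h'⟩, ?_⟩⟩
        intro e
        rw [Option.some.injEq] at e
        rw [e] at hc0
        simp at hc0
  · intro h
    rw [List.any_eq_true] at h
    obtain ⟨i, hmem, hf⟩ := h
    rw [PySem.List.mem_pyRange_one] at hmem
    obtain ⟨hi2, hilt⟩ := hmem
    obtain ⟨j, rfl⟩ : ∃ j : ℕ, i = (j : Int) :=
      ⟨i.toNat, (Int.toNat_of_nonneg (by omega)).symm⟩
    have hj2 : 2 ≤ j := by exact_mod_cast hi2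
    have hjle : j ≤ cs.length := by
      have : (j : Int) < (cs.length : Int) + 1 := hilt
      omega
    rw [PySem.List.slice_to cs (by positivity), Int.toNat_natCast,
        PySem.List.slice_from cs (by positivity), Int.toNat_natCast,
        PySem.List.pyGet?_natCast] at hf
    simp only [Bool.and_eq_true, Bool.or_eq_true] at hf
    obtain ⟨hfa, hrest⟩ := hf
    have halltj : ∀ x ∈ cs.take j, PySem.Chars.isalpha x = true := by
      simp only [PySem.Chars.strIsalpha, Bool.and_eq_true, List.all_eq_true] at hfa
      exact hfa.2
    have h2 : PySem.Chars.strIsalpha (cs.take 2) = true := by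
      have ht2 : cs.take 2 = (cs.take j).take 2 := by
        rw [List.take_take]; congr 1; omega
      have hne2 : cs.take 2 ≠ [] := by
        intro e
        have hl : (cs.take 2).length = 0 := by rw [e]; rfl
        rw [List.length_take] at hl
        omega
      simp only [PySem.Chars.strIsalpha, Bool.and_eq_true, List.all_eq_true,
        List.isEmpty_eq_false_iff, Bool.not_eq_eq_eq_not, Bool.not_true]
      exact ⟨hne2, fun x hx => halltj x (List.take_subset 2 _ (ht2 ▸ hx))⟩
    rw [if_neg (by simp [h2])]
    rcases hrest with hjn | hd
    · have hjn' : j = cs.length := by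
        rw [beq_iff_eq] at hjn
        exact_mod_cast hjn
      have hall : ∀ x ∈ cs, PySem.Chars.isalpha x = true := by
        have : cs.take j = cs := by rw [hjn', List.take_length]
        rw [this] at halltj
        exact halltj
      rw [List.dropWhile_eq_nil_iff.mpr hall]
    · obtain ⟨hdig, hne0⟩ := hd
      have hjlt : j < cs.length := by
        rcases lt_or_eq_of_le hjle with h' | h'
        · exact h'
        · rw [h', List.drop_length] at hdig
          simp [PySem.Chars.strIsdigit] at hdig
      have hdropj : cs.drop j = cs[j] :: cs.drop (j + 1) := List.drop_eq_getElem_cons hjlt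
      have hdigall : ∀ x ∈ cs.drop j, PySem.Chars.isdigit x = true := by
        simp only [PySem.Chars.strIsdigit, Bool.and_eq_true, List.all_eq_true] at hdig
        exact hdig.2
      have hjd : PySem.Chars.isdigit cs[j] = true :=
        hdigall _ (by rw [hdropj]; exact List.mem_cons_self ..)
      have hk_eq : (cs.takeWhile PySem.Chars.isalpha).length = j :=
        le_antisymm (len_takeWhile_le_of_not _ cs j hjlt (digit_not_alpha _ hjd))
                    (le_len_takeWhile _ cs j hjle halltj)
      have hdwj : cs.dropWhile PySem.Chars.isalpha = cs[j] :: cs.drop (j + 1) := by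
        rw [← drop_len_takeWhile, hk_eq, hdropj]
      rw [hdwj]
      show (if (cs[j] == '0') = true then false
            else aAllDigits (cs[j] :: cs.drop (j + 1))) = true
      have hc0 : (cs[j] == '0') = false := by
        rw [List.getElem?_eq_getElem hjlt] at hne0
        by_contra hcc
        rw [Bool.not_eq_false] at hcc
        rw [beq_iff_eq] at hcc
        rw [hcc] at hne0
        simp at hne0
      rw [if_neg (by simp [hc0]), digits_eq]
      rw [← hdropj]
      simp only [List.all_eq_true]
      exact hdigall

-- ===== VERDICT (by name: the statement is the Claim_ definition above) =====
theorem is_valid_vanity_plate_spec : Claim_equal_is_valid_vanity_plate := by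
  intro plate _
  show is_valid_vanity_plate plate = is_valid_vanity_plate_alt plate
  unfold is_valid_vanity_plate is_valid_vanity_plate_alt
  by_cases hg : (2:Int) ≤ (plate.toList.length : Int) ∧ (plate.toList.length : Int) ≤ 6
  · rw [if_neg (not_not_intro hg), if_neg (not_not_intro hg)]
    exact main_eq plate.toList (by exact_mod_cast hg.1)
  · rw [if_pos hg, if_pos hg]
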